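-- pv_equiv track=rewrite | github.com/hhccode/ML2019SPRING | hw4/hw4_4.py | cover_image
-- ===== SOURCE A (Python) =====
-- import copy
--
-- def cover_image(img, pos, size):
--     x, y = pos
--     result = copy.deepcopy(img)
--     half = size // 2
--
--     for r in range(-half, half+1):
--         for c in range(-half, half+1):
--             if 0 <= x+r < 48 and 0 <= y+c < 48:
--                 result[x+r][y+c] = 255
--
--     return result
-- ===== SOURCE B (Python) =====
-- def cover_image(img, pos, size):
--     x, y = pos
--     half = size // 2
--     rlo, rhi = max(0, x - half), min(47, x + half)
--     clo, chi = max(0, y - half), min(47, y + half)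
--     return [
--         [255 if rlo <= r <= rhi and clo <= c <= chi else v
--          for c, v in enumerate(row)]
--         for r, row in enumerate(img)
--     ]
-- ===== Notes on version B (the rewrite author's own statement) =====
-- stated objective: simpler
-- what changed: Instead of scanning the whole (size//2)-square and bounds-testing every cell of a mutated deepcopy, B computes the clamped target rectangle once and rebuilds the image in a single enumerate pass, deciding each cell by rectangle membership.
import Mathlib
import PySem

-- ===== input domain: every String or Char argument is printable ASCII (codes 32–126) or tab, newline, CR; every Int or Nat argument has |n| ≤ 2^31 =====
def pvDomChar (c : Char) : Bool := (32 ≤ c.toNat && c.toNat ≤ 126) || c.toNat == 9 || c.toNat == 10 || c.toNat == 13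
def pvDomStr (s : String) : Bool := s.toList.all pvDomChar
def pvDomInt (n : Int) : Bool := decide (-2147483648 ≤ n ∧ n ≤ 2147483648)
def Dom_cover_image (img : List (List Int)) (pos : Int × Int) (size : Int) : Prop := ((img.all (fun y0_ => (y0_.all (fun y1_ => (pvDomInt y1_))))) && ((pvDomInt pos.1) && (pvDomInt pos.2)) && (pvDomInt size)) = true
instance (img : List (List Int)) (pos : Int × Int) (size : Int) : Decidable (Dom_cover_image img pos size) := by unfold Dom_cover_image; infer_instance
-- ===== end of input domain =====

-- B rebuilds the image in one enumerate pass over rows and cells, deciding each cell by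
-- membership in the clamped rectangle computed once up front, instead of A's mutation of a
-- deepcopy while scanning the whole size//2-square with a per-cell bounds test (simpler).

-- ===== PORT A =====
-- copy.deepcopy of a list of int lists is the identity on the VALUE, so it is dropped.
-- 'result[x+r][y+c] = 255' is ported by List.set on the toNat of the (checked nonnegative)
-- indices; inside Pre_cover_image every executed assignment is in range, exactly where the
-- Python assignment succeeds (out of range Python raises IndexError: excluded by Pre_).
def cover_image (img : List (List Int)) (pos : Int × Int) (size : Int) : List (List Int) :=
  let x := pos.1
  let y := pos.2
  let result := img
  let half := PySem.Int.floordiv size 2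
  (PySem.List.pyRange (-half) (half+1) 1).foldl (fun res r =>
    (PySem.List.pyRange (-half) (half+1) 1).foldl (fun res c =>
      if 0 ≤ x+r ∧ x+r < 48 ∧ 0 ≤ y+c ∧ y+c < 48 then
        res.set (x+r).toNat ((res.getD (x+r).toNat []).set (y+c).toNat 255)
      else res) res) result

-- ===== PORT B =====
def cover_image_alt (img : List (List Int)) (pos : Int × Int) (size : Int) : List (List Int) :=
  let x := pos.1
  let y := pos.2
  let half := PySem.Int.floordiv size 2
  let rlo := max 0 (x - half)
  let rhi := min 47 (x + half)
  let clo := max 0 (y - half)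
  let chi := min 47 (y + half)
  (PySem.List.enumerate img 0).map (fun rc =>
    (PySem.List.enumerate rc.2 0).map (fun cv =>
      if rlo ≤ rc.1 ∧ rc.1 ≤ rhi ∧ clo ≤ cv.1 ∧ cv.1 ≤ chi then 255 else cv.2))

-- ===== PRECONDITION & SPEC =====
-- Pre_ excludes exactly the inputs on which Python A raises IndexError: the clamped
-- rectangle is nonempty but reaches a row index ≥ len(img), or a column index beyond
-- the length of a touched row.
def Pre_cover_image (img : List (List Int)) (pos : Int × Int) (size : Int) : Prop :=
  let half := PySem.Int.floordiv size 2
  let rlo := max 0 (pos.1 - half)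
  let rhi := min 47 (pos.1 + half)
  let clo := max 0 (pos.2 - half)
  let chi := min 47 (pos.2 + half)
  (rlo ≤ rhi ∧ clo ≤ chi) →
    (rhi < (img.length : Int) ∧
     ∀ i ∈ PySem.List.pyRange rlo (rhi+1) 1, chi < ((img.getD i.toNat []).length : Int))
instance (img : List (List Int)) (pos : Int × Int) (size : Int) : Decidable (Pre_cover_image img pos size) := by unfold Pre_cover_image; infer_instance

def pvWitness_cover_image : List (List Int) × (Int × Int) × Int := ([[1, 2], [3, 4]], (0, 1), 1)

def Spec_cover_image (img : List (List Int)) (pos : Int × Int) (size : Int) (out : List (List Int)) : Prop := out = cover_image_alt img pos size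
instance (img : List (List Int)) (pos : Int × Int) (size : Int) (out : List (List Int)) : Decidable (Spec_cover_image img pos size out) := by unfold Spec_cover_image; infer_instance

-- ===== CLAIM (what is proved, stated in full; the proofs are below) =====
def Claim_equal_cover_image : Prop := ∀ (img : List (List Int)) (pos : Int × Int) (size : Int), Dom_cover_image img pos size → Pre_cover_image img pos size → Spec_cover_image img pos size (cover_image img pos size)

-- ===== LEMMAS AND PROOFS =====

-- A's update step, at the granularity of one (r, c) offset pair.
def pvStep (x y : Int) (res : List (List Int)) (p : Int × Int) : List (List Int) :=
  if 0 ≤ x+p.1 ∧ x+p.1 < 48 ∧ 0 ≤ y+p.2 ∧ y+p.2 < 48 then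
    res.set (x+p.1).toNat ((res.getD (x+p.1).toNat []).set (y+p.2).toNat 255)
  else res

-- does some offset pair in ps target cell (i, j)?
def pvHit (x y : Int) (ps : List (Int × Int)) (i j : Nat) : Bool :=
  ps.any (fun p => decide (0 ≤ x+p.1 ∧ x+p.1 < 48 ∧ 0 ≤ y+p.2 ∧ y+p.2 < 48 ∧
                           x+p.1 = (i : Int) ∧ y+p.2 = (j : Int)))

theorem pv_double_eq_pairs (x y : Int) (l1 l2 : List Int) (init : List (List Int)) :
    l1.foldl (fun res r => l2.foldl (fun res c => pvStep x y res (r, c)) res) init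
      = (l1.flatMap (fun r => l2.map (fun c => (r, c)))).foldl (pvStep x y) init := by
  induction l1 generalizing init with
  | nil => rfl
  | cons a l ih =>
    simp only [List.foldl_cons, List.flatMap_cons, List.foldl_append, List.foldl_map]
    exact ih _

theorem pvStep_length (x y : Int) (res : List (List Int)) (p : Int × Int) :
    (pvStep x y res p).length = res.length := by
  unfold pvStep; split <;> simp

theorem pv_fold_length (x y : Int) (ps : List (Int × Int)) (init : List (List Int)) :
    (ps.foldl (pvStep x y) init).length = init.length := by
  induction ps generalizing init with
  | nil => rfl
  | cons p ps ih => simp only [List.foldl_cons]; rw [ih, pvStep_length]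

theorem pvStep_cell (x y : Int) (init : List (List Int)) (p : Int × Int) (i j : Nat) :
    ((pvStep x y init p)[i]?.bind (fun row => row[j]?))
      = (init[i]?.bind (fun row => row[j]?)).map
          (fun v => if pvHit x y [p] i j then 255 else v) := by
  have hhit : pvHit x y [p] i j
      = decide (0 ≤ x+p.1 ∧ x+p.1 < 48 ∧ 0 ≤ y+p.2 ∧ y+p.2 < 48 ∧
                x+p.1 = (i : Int) ∧ y+p.2 = (j : Int)) := by
    simp [pvHit]
  unfold pvStep
  by_cases hc : 0 ≤ x+p.1 ∧ x+p.1 < 48 ∧ 0 ≤ y+p.2 ∧ y+p.2 < 48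
  · rw [if_pos hc]
    obtain ⟨h1, h2, h3, h4⟩ := hc
    by_cases hi : (x+p.1).toNat = i
    · have hxi : x + p.1 = (i : Int) := by omega
      rw [hi]
      by_cases hlen : i < init.length
      · rw [List.getElem?_set_self hlen, List.getElem?_eq_getElem hlen,
            List.getD_eq_getElem init [] hlen]
        simp only [Option.bind_some]
        rw [List.getElem?_set]
        by_cases hj : (y+p.2).toNat = j
        · have hyj : y + p.2 = (j : Int) := by omega
          rw [if_pos hj, hj]
          by_cases hjl : j < (init[i]'hlen).length
          · rw [if_pos hjl, List.getElem?_eq_getElem hjl, hhit]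
            simp only [Option.map_some, decide_eq_true_eq]
            rw [if_pos ⟨h1, h2, h3, h4, hxi, hyj⟩]
          · rw [if_neg hjl, List.getElem?_eq_none (by omega)]
            simp
        · rw [if_neg hj, hhit]
          have hne : ¬ (y + p.2 = (j : Int)) := by omega
          simp [hne]
      · have h0 : init[i]? = none := List.getElem?_eq_none (by omega)
        have h1' : (init.set i ((init.getD i []).set (y+p.2).toNat 255))[i]? = none :=
          List.getElem?_eq_none (by simp; omega)
        rw [h0, h1']; simp
    · rw [List.getElem?_set_ne hi, hhit]
      have hne : ¬ (x + p.1 = (i : Int)) := by omega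
      simp [hne]
  · rw [if_neg hc, hhit]
    have hne : ¬ (0 ≤ x+p.1 ∧ x+p.1 < 48 ∧ 0 ≤ y+p.2 ∧ y+p.2 < 48 ∧
                  x+p.1 = (i : Int) ∧ y+p.2 = (j : Int)) := by tauto
    cases h : init[i]?.bind (fun row => row[j]?) <;> simp [hne]

theorem pv_fold_cell (x y : Int) (ps : List (Int × Int)) (init : List (List Int)) (i j : Nat) :
    ((ps.foldl (pvStep x y) init)[i]?.bind (fun row => row[j]?))
      = (init[i]?.bind (fun row => row[j]?)).map
          (fun v => if pvHit x y ps i j then 255 else v) := by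
  induction ps generalizing init with
  | nil =>
    cases h : init[i]?.bind (fun row => row[j]?) <;> simp [pvHit, List.foldl_nil, h]
  | cons p ps ih =>
    simp only [List.foldl_cons]
    rw [ih, pvStep_cell]
    have hsplit : pvHit x y (p :: ps) i j = (pvHit x y [p] i j || pvHit x y ps i j) := by
      simp [pvHit]
    rw [hsplit]
    cases h : init[i]?.bind (fun row => row[j]?) with
    | none => simp
    | some v =>
      simp only [Option.map_some]
      by_cases h1 : pvHit x y [p] i j = true <;> by_cases h2 : pvHit x y ps i j = true <;>
        simp [h1, h2]

-- rectangle membership ↔ some offset pair hits the cell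
theorem pvHit_iff_rect (x y half : Int) (i j : Nat) :
    pvHit x y ((PySem.List.pyRange (-half) (half+1) 1).flatMap
        (fun r => (PySem.List.pyRange (-half) (half+1) 1).map (fun c => (r, c)))) i j = true
      ↔ (max 0 (x - half) ≤ (i : Int) ∧ (i : Int) ≤ min 47 (x + half) ∧
         max 0 (y - half) ≤ (j : Int) ∧ (j : Int) ≤ min 47 (y + half)) := by
  simp only [pvHit, List.any_eq_true, List.mem_flatMap, List.mem_map,
    PySem.List.mem_pyRange_one, decide_eq_true_eq]
  constructor
  · rintro ⟨p, ⟨r, hr, c, hc, rfl⟩, h⟩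
    simp only at h
    omega
  · rintro ⟨hrlo, hrhi, hclo, hchi⟩
    refine ⟨((i : Int) - x, (j : Int) - y),
      ⟨(i : Int) - x, by omega, (j : Int) - y, by omega, rfl⟩, ?_⟩
    simp only
    omega

theorem pv_fold_eq_alt (x y half : Int) (img : List (List Int)) :
    (((PySem.List.pyRange (-half) (half+1) 1).flatMap
        (fun r => (PySem.List.pyRange (-half) (half+1) 1).map (fun c => (r, c)))).foldl
          (pvStep x y) img)
      = (PySem.List.enumerate img 0).map (fun rc =>
          (PySem.List.enumerate rc.2 0).map (fun cv =>
            if max 0 (x - half) ≤ rc.1 ∧ rc.1 ≤ min 47 (x + half) ∧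
               max 0 (y - half) ≤ cv.1 ∧ cv.1 ≤ min 47 (y + half) then 255 else cv.2)) := by
  set ps := (PySem.List.pyRange (-half) (half+1) 1).flatMap
      (fun r => (PySem.List.pyRange (-half) (half+1) 1).map (fun c => (r, c))) with hps
  apply List.ext_getElem?
  intro i
  by_cases hi : i < img.length
  · have hlen2 : i < (ps.foldl (pvStep x y) img).length := by
      rw [pv_fold_length]; exact hi
    have hrowA : (ps.foldl (pvStep x y) img)[i]?
        = some ((ps.foldl (pvStep x y) img)[i]'hlen2) := List.getElem?_eq_getElem hlen2
    rw [hrowA, List.getElem?_map, PySem.List.getElem?_enumerate,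
        List.getElem?_eq_getElem hi]
    simp only [Option.map_some]
    congr 1
    apply List.ext_getElem?
    intro j
    have hlhs : ((ps.foldl (pvStep x y) img)[i]'hlen2)[j]?
        = (ps.foldl (pvStep x y) img)[i]?.bind (fun row => row[j]?) := by
      rw [hrowA]; rfl
    rw [hlhs, pv_fold_cell, List.getElem?_eq_getElem hi,
        List.getElem?_map, PySem.List.getElem?_enumerate]
    simp only [Option.bind_some, Int.zero_add]
    cases hj : (img[i])[j]? with
    | none => simp
    | some v =>
      simp only [Option.map_some]
      congr 1
      exact if_congr (by rw [pvHit_iff_rect x y half i j]) rfl rfl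
  · have h1 : (ps.foldl (pvStep x y) img)[i]? = none := by
      rw [List.getElem?_eq_none]; rw [pv_fold_length]; omega
    have h2 : ((PySem.List.enumerate img 0).map (fun rc =>
          (PySem.List.enumerate rc.2 0).map (fun cv =>
            if max 0 (x - half) ≤ rc.1 ∧ rc.1 ≤ min 47 (x + half) ∧
               max 0 (y - half) ≤ cv.1 ∧ cv.1 ≤ min 47 (y + half) then 255
            else cv.2)))[i]? = none := by
      rw [List.getElem?_eq_none]; simp [PySem.List.length_enumerate]; omega
    rw [h1, h2]

-- the unconditional pointwise equality of the two ports
theorem pv_ports_eq (img : List (List Int)) (pos : Int × Int) (size : Int) :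
    cover_image img pos size = cover_image_alt img pos size := by
  exact (pv_double_eq_pairs pos.1 pos.2
      (PySem.List.pyRange (-(PySem.Int.floordiv size 2)) ((PySem.Int.floordiv size 2)+1) 1)
      (PySem.List.pyRange (-(PySem.Int.floordiv size 2)) ((PySem.Int.floordiv size 2)+1) 1)
      img).trans
    (pv_fold_eq_alt pos.1 pos.2 (PySem.Int.floordiv size 2) img)

-- ===== VERDICT (by name: the statement is the Claim_ definition above) =====
theorem cover_image_spec : Claim_equal_cover_image := by
  intro img pos size _ _
  unfold Spec_cover_image
  exact pv_ports_eq img pos size
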